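-- pv_equiv track=rewrite | github.com/Zhengxian-Liu/ASR | ASR.py | filter_similar_sentences
-- ===== SOURCE A (Python) =====
-- def label_sentences(text1, text2):
--     def normalize_text(text):
--         return ''.join(e for e in text.lower() if e.isalnum())
--
--     normalized_text1 = normalize_text(text1)
--     normalized_text2 = normalize_text(text2)
--
--     return normalized_text1 == normalized_text2
--
-- def filter_similar_sentences(transcriptions, show_similar=False):
--     filtered_transcriptions = {}
--     for key, value in transcriptions.items():
--         script_text = value.get('script', '')
--         transcription_text = value.get('transcription', '')
--         if label_sentences(script_text, transcription_text):
--             if show_similar: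
--                 filtered_transcriptions[key] = value
--         else:
--             filtered_transcriptions[key] = value
--     return filtered_transcriptions
-- ===== SOURCE B (Python) =====
-- def filter_similar_sentences(transcriptions, show_similar=False):
--     # Keep-all case decided up front: every entry survives, so return a copy.
--     if show_similar:
--         return dict(transcriptions)
--
--     def normalize_text(text):
--         return ''.join(filter(str.isalnum, text.lower()))
--
--     # Pass 1: collect the keys whose two normalized fields coincide.
--     drop = {k for k, v in transcriptions.items()
--             if normalize_text(v.get('script', '')) == normalize_text(v.get('transcription', ''))}
--     # Pass 2: rebuild the dict without those keys.
--     return {k: v for k, v in transcriptions.items() if k not in drop}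
-- ===== Notes on version B (the rewrite author's own statement) =====
-- stated objective: alternative
-- what changed: B first branches on show_similar (shallow copy, no normalization) and otherwise works in two staged passes: pass 1 builds a set of keys whose normalized fields coincide, pass 2 rebuilds the dict by key-set membership, replacing A's single accumulator loop with nested per-entry branches.
import Mathlib
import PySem

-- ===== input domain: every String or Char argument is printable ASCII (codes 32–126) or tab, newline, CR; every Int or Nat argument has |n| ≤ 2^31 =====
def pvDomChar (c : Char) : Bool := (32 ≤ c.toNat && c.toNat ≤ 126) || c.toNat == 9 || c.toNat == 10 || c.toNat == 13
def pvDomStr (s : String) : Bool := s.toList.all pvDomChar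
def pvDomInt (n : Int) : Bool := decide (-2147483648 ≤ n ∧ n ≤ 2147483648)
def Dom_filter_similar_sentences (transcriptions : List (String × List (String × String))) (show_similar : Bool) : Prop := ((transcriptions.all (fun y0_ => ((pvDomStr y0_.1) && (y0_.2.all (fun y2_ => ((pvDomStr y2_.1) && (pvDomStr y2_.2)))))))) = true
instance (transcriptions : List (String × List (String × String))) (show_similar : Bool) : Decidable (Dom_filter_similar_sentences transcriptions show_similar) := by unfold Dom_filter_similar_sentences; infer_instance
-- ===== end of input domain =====

-- B branches on show_similar up front (plain copy) and otherwise runs two staged passes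
-- (build a drop-set of keys, then rebuild by key-set membership) instead of A's single
-- accumulator loop with nested branches; objective: alternative, not faster.

-- ===== PORT A =====
def pvNormalizeTextA (text : String) : String :=
  String.ofList ((PySem.Str.lower text).toList.filter PySem.Chars.isalnum)

def pvLabelSentences (text1 text2 : String) : Bool :=
  pvNormalizeTextA text1 == pvNormalizeTextA text2

def filter_similar_sentences (transcriptions : List (String × List (String × String))) (show_similar : Bool) : List (String × List (String × String)) :=
  ((PySem.Dict.ofList transcriptions).items.foldl
    (fun acc kv =>
      let value := PySem.Dict.ofList kv.2
      let script_text := value.getD "script" ""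
      let transcription_text := value.getD "transcription" ""
      if pvLabelSentences script_text transcription_text then
        if show_similar then acc.insert kv.1 kv.2 else acc
      else acc.insert kv.1 kv.2)
    PySem.Dict.empty).items

-- ===== PORT B =====
def pvNormalizeTextB (text : String) : String :=
  String.ofList ((PySem.Str.lower text).toList.filter PySem.Chars.isalnum)

def pvSameB (value : List (String × String)) : Bool :=
  pvNormalizeTextB ((PySem.Dict.ofList value).getD "script" "")
    == pvNormalizeTextB ((PySem.Dict.ofList value).getD "transcription" "")

def filter_similar_sentences_alt (transcriptions : List (String × List (String × String))) (show_similar : Bool) : List (String × List (String × String)) :=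
  let d := PySem.Dict.ofList transcriptions
  if show_similar then d.items
  else
    -- Pass 1: set comprehension of keys to drop
    let drop : PySem.Set String :=
      PySem.Set.ofList ((d.items.filter (fun kv => pvSameB kv.2)).map Prod.fst)
    -- Pass 2: rebuild without those keys
    (PySem.Dict.ofList (d.items.filter (fun kv => !(PySem.Set.contains drop kv.1)))).items

-- ===== PRECONDITION & SPEC =====
def Spec_filter_similar_sentences (transcriptions : List (String × List (String × String))) (show_similar : Bool) (out : List (String × List (String × String))) : Prop := out = filter_similar_sentences_alt transcriptions show_similar
instance (transcriptions : List (String × List (String × String))) (show_similar : Bool) (out : List (String × List (String × String))) : Decidable (Spec_filter_similar_sentences transcriptions show_similar out) := by unfold Spec_filter_similar_sentences; infer_instance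

-- ===== CLAIM (what is proved, stated in full; the proofs are below) =====
def Claim_equal_filter_similar_sentences : Prop := ∀ (transcriptions : List (String × List (String × String))) (show_similar : Bool), Dom_filter_similar_sentences transcriptions show_similar → Spec_filter_similar_sentences transcriptions show_similar (filter_similar_sentences transcriptions show_similar)

-- ===== LEMMAS AND PROOFS =====

-- A's label predicate on the entry's two fields is B's pvSameB.
lemma label_eq_same (v : List (String × String)) :
    pvLabelSentences ((PySem.Dict.ofList v).getD "script" "")
        ((PySem.Dict.ofList v).getD "transcription" "") = pvSameB v := by
  simp [pvLabelSentences, pvSameB, pvNormalizeTextA, pvNormalizeTextB]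

-- A's accumulator loop over fresh, distinct keys appends exactly the kept entries.
lemma foldA_items (show_similar : Bool)
    (l : List (String × List (String × String)))
    (d : PySem.Dict String (List (String × String)))
    (hnd : (d.items.map Prod.fst).Nodup)
    (hfresh : ∀ kv ∈ l, d.contains kv.1 = false)
    (hl : (l.map Prod.fst).Nodup) :
    (l.foldl
      (fun acc kv =>
        if pvLabelSentences ((PySem.Dict.ofList kv.2).getD "script" "")
            ((PySem.Dict.ofList kv.2).getD "transcription" "") then
          if show_similar then acc.insert kv.1 kv.2 else acc
        else acc.insert kv.1 kv.2) d).items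
      = d.items ++ l.filter (fun kv => !(pvSameB kv.2) || show_similar) := by
  induction l generalizing d with
  | nil => simp
  | cons kv l ih =>
    have hfkv : d.contains kv.1 = false := hfresh kv (List.mem_cons_self ..)
    have hins : (d.insert kv.1 kv.2).items = d.items ++ [(kv.1, kv.2)] := by
      rw [PySem.Dict.items_insert, hfkv]; simp
    have hndi : ((d.insert kv.1 kv.2).items.map Prod.fst).Nodup := by
      rw [hins, List.map_append]
      refine List.Nodup.append hnd (by simp) ?_
      intro a ha hb
      simp only [List.map_cons, List.map_nil, List.mem_singleton] at hb
      subst hb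
      simp only [List.mem_map] at ha
      obtain ⟨p, hp, hpa⟩ := ha
      have hc : d.contains p.1 = true := by
        rw [PySem.Dict.contains_iff_mem_keys]
        simpa [PySem.Dict.keys] using List.mem_map_of_mem (f := Prod.fst) hp
      rw [hpa, hfkv] at hc; exact absurd hc (by simp)
    have hfreshi : ∀ p ∈ l, (d.insert kv.1 kv.2).contains p.1 = false := by
      intro p hp
      rw [PySem.Dict.contains_insert]
      have h1 : (p.1 == kv.1) = false := by
        simp only [List.map_cons, List.nodup_cons] at hl
        have := hl.1
        simp only [beq_eq_false_iff_ne, ne_eq]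
        intro h; exact this (h ▸ List.mem_map_of_mem (f := Prod.fst) hp)
      rw [h1, hfresh p (List.mem_cons_of_mem _ hp)]; rfl
    have hl' : (l.map Prod.fst).Nodup := by
      simp only [List.map_cons, List.nodup_cons] at hl; exact hl.2
    have hlab := label_eq_same kv.2
    simp only [List.foldl_cons]
    cases hd : pvSameB kv.2 with
    | true =>
      have hlabT : pvLabelSentences ((PySem.Dict.ofList kv.2).getD "script" "")
          ((PySem.Dict.ofList kv.2).getD "transcription" "") = true := by rw [hlab, hd]
      rw [if_pos hlabT]
      by_cases hs : show_similar = true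
      · rw [if_pos hs, ih _ hndi hfreshi hl', hins]
        simp [hs]
      · rw [if_neg hs,
          ih d hnd (fun p hp => hfresh p (List.mem_cons_of_mem _ hp)) hl']
        have hsf : show_similar = false := Bool.of_not_eq_true hs
        simp [hd, hsf]
    | false =>
      have hlabF : ¬ (pvLabelSentences ((PySem.Dict.ofList kv.2).getD "script" "")
          ((PySem.Dict.ofList kv.2).getD "transcription" "") = true) := by rw [hlab, hd]; simp
      rw [if_neg hlabF, ih _ hndi hfreshi hl', hins]
      simp [hd]

-- A dict built from a pairs list with distinct keys lists exactly those pairs.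
lemma items_ofList_of_nodup (l : List (String × List (String × String)))
    (hl : (l.map Prod.fst).Nodup) : (PySem.Dict.ofList l).items = l := by
  have h := PySem.Dict.items_foldl_insert_fresh (l := l) (k := Prod.fst) (v := Prod.snd)
      (d := (PySem.Dict.empty : PySem.Dict String (List (String × String))))
      (by intro a _; rfl) hl
  simpa [PySem.Dict.ofList] using h

-- On a list with distinct keys, membership in the drop-set is entry-wise pvSameB.
lemma contains_drop_eq (items : List (String × List (String × String)))
    (hk : (items.map Prod.fst).Nodup)
    (kv : String × List (String × String)) (hkv : kv ∈ items) :
    PySem.Set.contains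
      (PySem.Set.ofList ((items.filter (fun kv => pvSameB kv.2)).map Prod.fst)) kv.1
      = pvSameB kv.2 := by
  cases hd : pvSameB kv.2 with
  | true =>
    have : kv.1 ∈ (items.filter (fun kv => pvSameB kv.2)).map Prod.fst :=
      List.mem_map_of_mem (f := Prod.fst) (List.mem_filter.mpr ⟨hkv, hd⟩)
    simpa [PySem.Set.contains_iff, PySem.Set.mem_ofList] using this
  | false =>
    rw [Bool.eq_false_iff]
    intro hc
    rw [PySem.Set.contains_iff, PySem.Set.mem_ofList, List.mem_map] at hc
    obtain ⟨kv', hkv', hfst⟩ := hc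
    have hkv'mem := (List.mem_filter.mp hkv').1
    have hsame' := (List.mem_filter.mp hkv').2
    have : kv' = kv := List.inj_on_of_nodup_map hk hkv'mem hkv hfst
    rw [this, hd] at hsame'; exact absurd hsame' (by simp)

-- ===== VERDICT (by name: the statement is the Claim_ definition above) =====
theorem filter_similar_sentences_spec : Claim_equal_filter_similar_sentences := by
  intro ts show_similar _
  unfold Spec_filter_similar_sentences filter_similar_sentences filter_similar_sentences_alt
  have hk : ((PySem.Dict.ofList ts).items.map Prod.fst).Nodup := by
    have := PySem.Dict.nodup_keys_ofList (κ := String) (ν := List (String × String)) ts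
    simpa [PySem.Dict.keys] using this
  rw [foldA_items show_similar _ _ (by simp [PySem.Dict.empty]) (by simp [PySem.Dict.contains_empty]) hk]
  have hemp : (PySem.Dict.empty : PySem.Dict String (List (String × String))).items = [] := rfl
  cases show_similar with
  | true => simp [hemp]
  | false =>
    simp only [Bool.false_eq_true, if_false, Bool.or_false, hemp, List.nil_append]
    have hfc : ((PySem.Dict.ofList ts).items.filter (fun kv =>
        !(PySem.Set.contains (PySem.Set.ofList
          (((PySem.Dict.ofList ts).items.filter (fun kv => pvSameB kv.2)).map Prod.fst)) kv.1)))
        = (PySem.Dict.ofList ts).items.filter (fun kv => !(pvSameB kv.2)) :=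
      List.filter_congr (fun kv hkv => by rw [contains_drop_eq _ hk kv hkv])
    rw [hfc]
    have hsub := List.filter_sublist
      (p := fun kv => !(pvSameB kv.2)) (l := (PySem.Dict.ofList ts).items)
    have hnd2 := (hsub.map Prod.fst).nodup hk
    rw [items_ofList_of_nodup _ hnd2]
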